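-- pv_equiv track=rewrite | github.com/a-marquez/advent-of-code-22 | 08.py | view_distance_left
-- ===== SOURCE A (Python) =====
-- def view_distance_left(grid, ri, ci):
--   if ci == 0: return 0
--
--   view_distance = 0
--   xi = ci
--   while xi != 0:
--     xi -= 1
--     view_distance += 1
--     compare_tree = grid[ri][xi]
--     if compare_tree >= grid[ri][ci]: break
--   return(view_distance)
-- ===== SOURCE B (Python) =====
-- def view_distance_left(grid, ri, ci):
--     row = grid[ri]
--     h = row[ci]
--     last = -1
--     for j in range(ci):
--         if row[j] >= h:
--             last = j
--     return ci - last if last != -1 else ci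
-- ===== Notes on version B (the rewrite author's own statement) =====
-- stated objective: alternative
-- what changed: B scans the prefix left-to-right once with no early break, keeping the index of the last tree >= the target height, and returns ci - last (or ci when none), instead of A's right-to-left walk with a running counter and a break at the first blocker.
-- outside the precondition, e.g. on view_distance_left([[3, 1, 2]], 0, -1): A returns 2, B returns -1
import Mathlib
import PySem

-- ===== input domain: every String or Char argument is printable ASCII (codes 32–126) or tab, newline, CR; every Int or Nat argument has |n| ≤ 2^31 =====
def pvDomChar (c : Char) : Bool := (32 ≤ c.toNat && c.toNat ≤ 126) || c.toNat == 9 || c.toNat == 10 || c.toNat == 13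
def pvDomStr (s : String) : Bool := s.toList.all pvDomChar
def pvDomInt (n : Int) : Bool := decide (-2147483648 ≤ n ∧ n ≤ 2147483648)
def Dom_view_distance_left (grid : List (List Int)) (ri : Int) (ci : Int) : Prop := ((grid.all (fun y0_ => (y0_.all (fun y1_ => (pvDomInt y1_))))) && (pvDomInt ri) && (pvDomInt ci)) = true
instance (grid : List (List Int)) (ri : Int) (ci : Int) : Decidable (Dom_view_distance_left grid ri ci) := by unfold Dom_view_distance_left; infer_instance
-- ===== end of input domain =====

-- B replaces A's right-to-left walk with break by a single left-to-right prefix scan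
-- keeping the index of the last blocker (alternative decomposition, same cost).


-- ===== PORT A =====
-- the while loop: xi counts down from ci, view_distance counts up, break at the first tree ≥ h;
-- fuel = ci.toNat only makes the recursion total (inside Pre_ the loop always stops within ci steps)
def viewLoopA (row : List Int) (h : Int) (xi vd : Int) (fuel : Nat) : Int :=
  match fuel with
  | 0 => vd
  | fuel + 1 =>
    if xi = 0 then vd
    else
      let xi' := xi - 1
      let vd' := vd + 1
      let compare_tree := PySem.List.pyGetD row xi' 0
      if compare_tree ≥ h then vd' else viewLoopA row h xi' vd' fuel

def view_distance_left (grid : List (List Int)) (ri : Int) (ci : Int) : Int :=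
  if ci = 0 then 0
  else
    let row := PySem.List.pyGetD grid ri []
    let h := PySem.List.pyGetD row ci 0
    viewLoopA row h ci 0 ci.toNat

-- ===== PORT B =====
def view_distance_left_alt (grid : List (List Int)) (ri : Int) (ci : Int) : Int :=
  let row := PySem.List.pyGetD grid ri []
  let h := PySem.List.pyGetD row ci 0
  let last := (PySem.List.pyRange 0 ci 1).foldl
    (fun last j => if PySem.List.pyGetD row j 0 ≥ h then j else last) (-1)
  if last ≠ -1 then ci - last else ci

-- ===== PRECONDITION & SPEC =====
-- Pre_ requires ri to be a valid Python index (wraparound included) and 0 ≤ ci < len(row);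
-- it excludes negative ci: there A's leftward walk wraps around and either returns a
-- wrapped-around distance or raises IndexError depending on the tree heights — a corner
-- no caller of this grid function would specify.
def Pre_view_distance_left (grid : List (List Int)) (ri : Int) (ci : Int) : Prop :=
  -(grid.length : Int) ≤ ri ∧ ri < (grid.length : Int) ∧
  0 ≤ ci ∧ ci < ((PySem.List.pyGetD grid ri []).length : Int)
instance (grid : List (List Int)) (ri : Int) (ci : Int) : Decidable (Pre_view_distance_left grid ri ci) := by unfold Pre_view_distance_left; infer_instance
def pvWitness_view_distance_left : List (List Int) × Int × Int := ([[3, 1, 2]], 0, 2)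

def Spec_view_distance_left (grid : List (List Int)) (ri : Int) (ci : Int) (out : Int) : Prop := out = view_distance_left_alt grid ri ci
instance (grid : List (List Int)) (ri : Int) (ci : Int) (out : Int) : Decidable (Spec_view_distance_left grid ri ci out) := by unfold Spec_view_distance_left; infer_instance

-- ===== CLAIM (what is proved, stated in full; the proofs are below) =====
def Claim_equal_view_distance_left : Prop := ∀ (grid : List (List Int)) (ri : Int) (ci : Int), Dom_view_distance_left grid ri ci → Pre_view_distance_left grid ri ci → Spec_view_distance_left grid ri ci (view_distance_left grid ri ci)

-- ===== LEMMAS AND PROOFS =====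

-- B's fold over range ci, restated on the Nat side
def lastBlk (row : List Int) (h : Int) (n : Nat) : Int :=
  (List.range n).foldl (fun (last : Int) (j : Nat) => if PySem.List.pyGetD row (j : Int) 0 ≥ h then (j : Int) else last) (-1)

theorem lastBlk_succ (row : List Int) (h : Int) (n : Nat) :
    lastBlk row h (n + 1) =
      if PySem.List.pyGetD row (n : Int) 0 ≥ h then (n : Int) else lastBlk row h n := by
  unfold lastBlk
  rw [List.range_succ, List.foldl_append]
  rfl

-- A's counting-down loop computes n minus the last blocker index (or n when there is none)
theorem viewLoopA_eq (row : List Int) (h : Int) (n : Nat) (v : Int) :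
    viewLoopA row h (n : Int) v n =
      if lastBlk row h n = -1 then v + n else v + n - lastBlk row h n := by
  induction n generalizing v with
  | zero => simp [viewLoopA, lastBlk]
  | succ n ih =>
    rw [lastBlk_succ]
    have hne : ¬ ((n : Int) + 1 = 0) := by omega
    have e1 : ((n : Int) + 1 - 1) = (n : Int) := by ring
    show viewLoopA row h ((n : Int) + 1) v (n + 1) = _
    rw [viewLoopA]
    simp only [hne, if_false, e1]
    by_cases hb : PySem.List.pyGetD row (n : Int) 0 ≥ h
    · have hnn : ¬ ((n : Int) = -1) := by omega
      simp only [if_pos hb, if_neg hnn]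
      push_cast; ring
    · simp only [if_neg hb, ih (v + 1)]
      split_ifs <;> push_cast <;> ring
  

-- B's fold over pyRange 0 ci 1 equals lastBlk
theorem fold_eq_lastBlk (row : List Int) (h : Int) (n : Nat) :
    (PySem.List.pyRange 0 (n : Int) 1).foldl
      (fun last j => if PySem.List.pyGetD row j 0 ≥ h then j else last) (-1) = lastBlk row h n := by
  rw [PySem.List.pyRange_one]
  simp only [sub_zero, Int.toNat_natCast, List.foldl_map, lastBlk, zero_add]

-- ===== VERDICT (by name: the statement is the Claim_ definition above) =====
theorem view_distance_left_spec : Claim_equal_view_distance_left := by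
  intro grid ri ci _ hpre
  obtain ⟨-, -, hci0, -⟩ := hpre
  obtain ⟨n, hn⟩ : ∃ n : Nat, ci = (n : Int) := ⟨ci.toNat, by omega⟩
  subst hn
  unfold Spec_view_distance_left view_distance_left view_distance_left_alt
  dsimp only
  rw [fold_eq_lastBlk, Int.toNat_natCast]
  by_cases h0 : (n : Int) = 0
  · have hz : n = 0 := by omega
    subst hz
    simp [lastBlk]
  · rw [if_neg h0, viewLoopA_eq]
    split_ifs <;> omega
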